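-- pv_equiv track=rewrite | github.com/AbdallahZerfaoui/PokerCalculator | version 1.0/basic_functions.py | combinliste
-- ===== SOURCE A (Python) =====
-- def combinliste(seq):
--     p = []
--     i, imax = 0, len(seq)-1
--     while i<=imax:
--         s = [seq[i]]
--         j, jmax = i+1, len(seq)-1
--         while j<=jmax:
--             a=s+[seq[j]]
--             p.append(a)
--             j+=1
--         i += 1
--     return p
-- ===== SOURCE B (Python) =====
-- def combinliste(seq):
--     # Backward pass: when x is visited, suffix holds exactly the elements after x,
--     # so x's chunk of pairs is ready; chunks are built back-to-front and flattened once.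
--     chunks = []
--     suffix = []
--     for x in reversed(seq):
--         chunks.append([[x, y] for y in suffix])
--         suffix = [x] + suffix
--     chunks.reverse()
--     return [pair for chunk in chunks for pair in chunk]
-- ===== Notes on version B (the rewrite author's own statement) =====
-- stated objective: alternative
-- what changed: Replaced the two nested index-driven while loops by a single backward pass that maintains the suffix of already-visited elements, emits each element's chunk of pairs against that suffix, and reverses and flattens the chunks once.
import Mathlib
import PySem

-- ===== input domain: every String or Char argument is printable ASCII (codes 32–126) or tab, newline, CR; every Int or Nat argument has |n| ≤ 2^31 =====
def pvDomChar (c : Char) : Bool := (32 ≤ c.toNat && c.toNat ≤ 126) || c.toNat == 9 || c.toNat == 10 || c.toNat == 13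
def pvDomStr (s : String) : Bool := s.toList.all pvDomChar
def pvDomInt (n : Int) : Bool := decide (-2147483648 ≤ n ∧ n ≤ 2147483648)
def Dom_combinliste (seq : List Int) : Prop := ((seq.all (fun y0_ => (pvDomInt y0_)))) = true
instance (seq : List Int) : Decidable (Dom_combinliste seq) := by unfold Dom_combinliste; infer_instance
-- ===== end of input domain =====

-- B replaces A's two nested index-driven while loops by one backward pass with a suffix accumulator, building the chunks of pairs back-to-front and flattening once (alternative decomposition, same pairs in the same order).

-- ===== PORT A =====
-- inner while loop: j runs from i+1 to jmax, appending s ++ [seq[j]] to p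
def combinliste_innerA (seq s : List Int) (p : List (List Int)) (j jmax : Int) :
    List (List Int) :=
  if _h : j ≤ jmax then
    combinliste_innerA seq s (p ++ [s ++ [PySem.List.pyGetD seq j 0]]) (j + 1) jmax
  else p
termination_by (jmax + 1 - j).toNat
decreasing_by omega

-- outer while loop: i runs from 0 to imax
def combinliste_outerA (seq : List Int) (p : List (List Int)) (i imax : Int) :
    List (List Int) :=
  if _h : i ≤ imax then
    combinliste_outerA seq
      (combinliste_innerA seq [PySem.List.pyGetD seq i 0] p (i + 1) ((seq.length : Int) - 1))
      (i + 1) imax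
  else p
termination_by (imax + 1 - i).toNat
decreasing_by omega

def combinliste (seq : List Int) : List (List Int) :=
  combinliste_outerA seq [] 0 ((seq.length : Int) - 1)

-- ===== PORT B =====
-- backward pass over reversed(seq): chunks.append([[x,y] for y in suffix]); suffix = [x] + suffix;
-- then chunks.reverse() and flatten
def combinliste_alt (seq : List Int) : List (List Int) :=
  let st := seq.reverse.foldl
    (fun (st : List (List (List Int)) × List Int) x =>
      (st.1 ++ [st.2.map (fun y => [x, y])], x :: st.2)) ([], [])
  st.1.reverse.flatMap id

-- ===== PRECONDITION & SPEC =====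
def Spec_combinliste (seq : List Int) (out : List (List Int)) : Prop := out = combinliste_alt seq
instance (seq : List Int) (out : List (List Int)) : Decidable (Spec_combinliste seq out) := by unfold Spec_combinliste; infer_instance

-- ===== CLAIM (what is proved, stated in full; the proofs are below) =====
def Claim_equal_combinliste : Prop := ∀ (seq : List Int), Dom_combinliste seq → Spec_combinliste seq (combinliste seq)

-- ===== LEMMAS AND PROOFS =====

-- reference form of the all-pairs list, used to relate both ports
def pairsRef : List Int → List (List Int)
  | [] => []
  | h :: t => (t.map (fun x => [h, x])) ++ pairsRef t

-- chunk list produced by the backward pass, as a recursive function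
def chunksOf : List Int → List Int → List (List (List Int))
  | [], _ => []
  | x :: l, suf => (suf.map (fun y => [x, y])) :: chunksOf l (x :: suf)

theorem foldB_fst (l : List Int) (cs : List (List (List Int))) (suf : List Int) :
    (l.foldl (fun (st : List (List (List Int)) × List Int) x =>
        (st.1 ++ [st.2.map (fun y => [x, y])], x :: st.2)) (cs, suf)).1 =
      cs ++ chunksOf l suf := by
  induction l generalizing cs suf with
  | nil => simp [chunksOf]
  | cons x l ih => simp [List.foldl_cons, ih, chunksOf]

theorem chunksOf_concat (l : List Int) (x : Int) (suf : List Int) :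
    chunksOf (l ++ [x]) suf =
      chunksOf l suf ++ [(l.reverse ++ suf).map (fun y => [x, y])] := by
  induction l generalizing suf with
  | nil => simp [chunksOf]
  | cons a l ih => simp [chunksOf, ih, List.append_assoc]

theorem alt_eq_pairsRef (seq : List Int) : combinliste_alt seq = pairsRef seq := by
  show ((seq.reverse.foldl _ ([], [])).1).reverse.flatMap id = pairsRef seq
  rw [foldB_fst]
  simp only [List.nil_append]
  induction seq with
  | nil => simp [chunksOf, pairsRef]
  | cons h t ih =>
    rw [List.reverse_cons, chunksOf_concat, List.reverse_append, List.reverse_singleton,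
      List.singleton_append, List.flatMap_cons, ih]
    simp [pairsRef]

theorem innerA_spec (seq s : List Int) (p : List (List Int)) (j : Nat) :
    combinliste_innerA seq s p (j : Int) ((seq.length : Int) - 1) =
      p ++ (seq.drop j).map (fun y => s ++ [y]) := by
  by_cases hj : j < seq.length
  · have hlt : (j : Int) ≤ (seq.length : Int) - 1 := by omega
    rw [combinliste_innerA, dif_pos hlt]
    have hdrop : seq.drop j = seq[j] :: seq.drop (j + 1) :=
      List.drop_eq_getElem_cons hj
    have hget : PySem.List.pyGetD seq (j : Int) 0 = seq[j] := by
      simp [PySem.List.pyGetD_natCast, List.getD_eq_getElem?_getD, hj]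
    have := innerA_spec seq s (p ++ [s ++ [seq[j]]]) (j + 1)
    rw [hget]
    push_cast at this ⊢
    rw [this, hdrop, List.map_cons, List.append_assoc]
    rfl
  · have hge : ¬ ((j : Int) ≤ (seq.length : Int) - 1) := by omega
    rw [combinliste_innerA, dif_neg hge]
    rw [List.drop_eq_nil_of_le (by omega)]
    simp
termination_by seq.length - j

theorem outerA_spec (seq : List Int) (p : List (List Int)) (i : Nat) :
    combinliste_outerA seq p (i : Int) ((seq.length : Int) - 1) =
      p ++ pairsRef (seq.drop i) := by
  by_cases hi : i < seq.length
  · have hlt : (i : Int) ≤ (seq.length : Int) - 1 := by omega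
    rw [combinliste_outerA, dif_pos hlt]
    have hget : PySem.List.pyGetD seq (i : Int) 0 = seq[i] := by
      simp [PySem.List.pyGetD_natCast, List.getD_eq_getElem?_getD, hi]
    have hinner := innerA_spec seq [seq[i]] p (i + 1)
    have houter := outerA_spec seq
      (p ++ (seq.drop (i + 1)).map (fun y => [seq[i]] ++ [y])) (i + 1)
    have hdrop : seq.drop i = seq[i] :: seq.drop (i + 1) :=
      List.drop_eq_getElem_cons hi
    rw [hget]
    push_cast at hinner houter ⊢
    rw [hinner, houter, hdrop, pairsRef, List.append_assoc]
    simp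
  · have hge : ¬ ((i : Int) ≤ (seq.length : Int) - 1) := by omega
    rw [combinliste_outerA, dif_neg hge]
    rw [List.drop_eq_nil_of_le (by omega)]
    simp [pairsRef]
termination_by seq.length - i

-- ===== VERDICT (by name: the statement is the Claim_ definition above) =====
theorem combinliste_spec : Claim_equal_combinliste := by
  intro seq _
  unfold Spec_combinliste combinliste
  rw [alt_eq_pairsRef]
  have := outerA_spec seq [] 0
  simpa using this
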